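-- pv_equiv track=rewrite | github.com/thealper2/codewars-solutions | 6-kyu/arrays_of_lists_of_sets.py | solve
-- ===== SOURCE A (Python) =====
-- def solve(arr):
--     normalized = [''.join(sorted(set(s))) for s in arr]
--     groups = {}
--     for i, norm_str in enumerate(normalized):
--         if norm_str not in groups:
--             groups[norm_str] = []
--
--         groups[norm_str].append(i)
--
--     result = []
--     for indices in groups.values():
--         if len(indices) >= 2:
--             result.append(sum(indices))
--
--     return sorted(result)
-- ===== SOURCE B (Python) =====
-- def solve(arr):
--     # sort (normalized-key, index) pairs, then scan adjacent runs of equal keys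
--     pairs = [(''.join(sorted(set(s))), i) for i, s in enumerate(arr)]
--     pairs.sort(key=lambda t: t[0])
--     result = []
--     cur_key = None
--     cur_sum = 0
--     cur_cnt = 0
--     for key, i in pairs:
--         if key == cur_key:
--             cur_sum += i
--             cur_cnt += 1
--         else:
--             if cur_cnt >= 2:
--                 result.append(cur_sum)
--             cur_key = key
--             cur_sum = i
--             cur_cnt = 1
--     if cur_cnt >= 2:
--         result.append(cur_sum)
--     return sorted(result)
-- ===== Notes on version B (the rewrite author's own statement) =====
-- stated objective: alternative
-- what changed: Replaces the hash-dictionary of index lists with a sort of (normalized-key, index) pairs followed by a single linear scan over adjacent equal-key runs that accumulates each run's index sum and count.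
import Mathlib
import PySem

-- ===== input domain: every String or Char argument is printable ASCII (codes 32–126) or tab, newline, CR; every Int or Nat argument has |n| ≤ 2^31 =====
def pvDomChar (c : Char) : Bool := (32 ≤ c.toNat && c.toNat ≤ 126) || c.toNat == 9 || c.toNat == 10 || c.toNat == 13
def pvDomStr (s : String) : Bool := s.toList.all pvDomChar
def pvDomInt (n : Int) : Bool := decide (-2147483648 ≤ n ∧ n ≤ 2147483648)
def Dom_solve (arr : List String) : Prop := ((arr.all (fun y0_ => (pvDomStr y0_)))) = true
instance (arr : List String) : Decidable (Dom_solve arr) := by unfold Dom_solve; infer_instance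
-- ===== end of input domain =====

-- B replaces A's hash-dictionary grouping by a sort of (normalized key, index) pairs plus one
-- linear scan over adjacent equal-key runs (alternative decomposition, similar cost).
-- ''.join(sorted(set(s))) keys are ported on the List Char side (PySem convention for strings).

-- ===== PORT A =====
-- normalized key of a string: ''.join(sorted(set(s))), kept as List Char
def pvNorm (s : String) : List Char :=
  PySem.List.sorted (PySem.Set.ofList s.toList) (fun c => c) false

def solve (arr : List String) : List Int :=
  let normalized := arr.map pvNorm
  -- 'if norm_str not in groups: groups[norm_str] = []' followed by append = modify with default []
  let groups := (PySem.List.enumerate normalized 0).foldl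
      (fun d p => d.modify p.2 [] (fun l => l ++ [p.1])) PySem.Dict.empty
  let result := groups.values.foldl
      (fun r idxs => if 2 ≤ idxs.length then r ++ [idxs.sum] else r) []
  PySem.List.sorted result (fun x => x) false

-- ===== PORT B =====
-- linear scan over the key-sorted pair list: state = current key, run sum, run count, results
def pvScanRuns : List (List Char × Int) → Option (List Char) → Int → Int → List Int → List Int
  | [], _, csum, ccnt, res => if 2 ≤ ccnt then res ++ [csum] else res
  | (k, i) :: rest, ckey, csum, ccnt, res =>
    if some k = ckey then pvScanRuns rest ckey (csum + i) (ccnt + 1) res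
    else pvScanRuns rest (some k) i 1 (if 2 ≤ ccnt then res ++ [csum] else res)

def solve_alt (arr : List String) : List Int :=
  let pairs := PySem.List.sorted
      ((PySem.List.enumerate arr 0).map (fun p => (pvNorm p.2, p.1))) (fun t => t.1) false
  PySem.List.sorted (pvScanRuns pairs none 0 0 []) (fun x => x) false

-- ===== PRECONDITION & SPEC =====
def Spec_solve (arr : List String) (out : List Int) : Prop := out = solve_alt arr
instance (arr : List String) (out : List Int) : Decidable (Spec_solve arr out) := by unfold Spec_solve; infer_instance

-- ===== CLAIM (what is proved, stated in full; the proofs are below) =====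
def Claim_equal_solve : Prop := ∀ (arr : List String), Dom_solve arr → Spec_solve arr (solve arr)

-- ===== LEMMAS AND PROOFS =====

-- the (normalized key, original index) pair list that both sides group
def pvPairs (arr : List String) : List (List Char × Int) :=
  (PySem.List.enumerate arr 0).map (fun p => (pvNorm p.2, p.1))

lemma pv_enumerate_map {α β : Type} (f : α → β) (l : List α) (s : Int) :
    PySem.List.enumerate (l.map f) s = (PySem.List.enumerate l s).map (fun p => (p.1, f p.2)) := by
  induction l generalizing s with
  | nil => rfl
  | cons x t ih => simp [PySem.List.enumerate, ih]

lemma pv_sorted_inst {α : Type} (xs : List α) (key : α → List Char) (rev : Bool) :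
    PySem.List.sorted xs key rev
      = @PySem.List.sorted α (List Char) List.instLinearOrder.toLT LinearOrder.toDecidableLT xs key rev :=
  congrArg (fun inst => @PySem.List.sorted α (List Char) List.instLT inst xs key rev)
    (Subsingleton.elim _ _)

lemma pv_sorted_inst_int {α : Type} (xs : List α) (key : α → Int) (rev : Bool) :
    PySem.List.sorted xs key rev
      = @PySem.List.sorted α Int (by infer_instance) (@LinearOrder.toDecidableLT Int _) xs key rev :=
  congrArg (fun inst => @PySem.List.sorted α Int Int.instLTInt inst xs key rev)
    (Subsingleton.elim _ _)


-- grouping fold over the normalized enumeration = grouping fold over pvPairs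

lemma pv_scan_same_key (run rest : List (List Char × Int)) (k : List Char)
    (h : ∀ p ∈ run, p.1 = k) (csum ccnt : Int) (res : List Int) :
    pvScanRuns (run ++ rest) (some k) csum ccnt res
      = pvScanRuns rest (some k) (csum + (run.map (·.2)).sum) (ccnt + run.length) res := by
  induction run generalizing csum ccnt with
  | nil => simp
  | cons p t ih =>
    obtain ⟨k1, i⟩ := p
    have hk : k1 = k := h (k1, i) (by simp)
    subst hk
    simp only [List.cons_append, pvScanRuns]
    rw [ih (fun q hq => h q (by simp [hq]))]
    simp only [List.map_cons, List.sum_cons, List.length_cons]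
    rw [if_pos trivial]
    have e1 : csum + i + (List.map (fun x => x.2) t).sum = csum + (i + (List.map (fun x => x.2) t).sum) := by ring
    have e2 : ccnt + 1 + (t.length : Int) = ccnt + ((t.length + 1 : Nat) : Int) := by push_cast; ring
    rw [e1, e2]

lemma pv_scan_runs (K : List (List Char)) (r : List Char → List (List Char × Int))
    (hne : ∀ k ∈ K, r k ≠ []) (hkey : ∀ k ∈ K, ∀ p ∈ r k, p.1 = k)
    (hnd : K.Nodup) (ckey : Option (List Char)) (hck : ∀ k ∈ K, some k ≠ ckey)
    (csum ccnt : Int) (res : List Int) :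
    pvScanRuns (K.flatMap r) ckey csum ccnt res
      = (if 2 ≤ ccnt then res ++ [csum] else res)
        ++ (K.filter (fun k => decide (2 ≤ (r k).length))).map (fun k => ((r k).map (·.2)).sum) := by
  induction K generalizing ckey csum ccnt res with
  | nil => simp [pvScanRuns]
  | cons k K' ih =>
    obtain ⟨q, rq, hq⟩ : ∃ q rq, r k = q :: rq := by
      cases hrk : r k with
      | nil => exact absurd hrk (hne k (by simp))
      | cons a b => exact ⟨a, b, rfl⟩
    have hqk : q.1 = k := hkey k (by simp) q (by simp [hq])
    have htk : ∀ p ∈ rq, p.1 = k := fun p hp => hkey k (by simp) p (by simp [hq, hp])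
    simp only [List.flatMap_cons, hq, List.cons_append]
    obtain ⟨k1, i⟩ := q
    simp only at hqk; subst hqk
    simp only [pvScanRuns]
    rw [if_neg (by simpa using hck k1 (by simp))]
    rw [pv_scan_same_key rq _ k1 htk]
    rw [ih (fun x hx => hne x (by simp [hx])) (fun x hx => hkey x (by simp [hx]))
        (hnd.of_cons) (some k1)
        (fun x hx => by
          simp only [ne_eq, Option.some.injEq]
          exact fun h => (List.nodup_cons.mp hnd).1 (h ▸ hx))]
    simp only [List.filter_cons, hq]
    by_cases hc : 2 ≤ (1 : Int) + (rq.length : Int)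
    · rw [if_pos hc]
      have hd : decide (2 ≤ ((k1, i) :: rq).length) = true := by simp; omega
      rw [hd]
      simp only [if_pos trivial, List.map_cons, hq, List.map_cons, List.sum_cons,
        List.append_assoc, List.singleton_append]
    · rw [if_neg hc]
      have hlen0 : rq.length = 0 := by omega
      have hd : decide (2 ≤ ((k1, i) :: rq).length) = false := by simp [hlen0]
      rw [hd]
      simp

lemma pv_sorted_flatMap (K : List (List Char)) (ys : List (List Char × Int))
    (hys : ys.Pairwise (fun a b => a.1 ≤ b.1)) (hK : K.Pairwise (· < ·))
    (hcov : ∀ p ∈ ys, p.1 ∈ K) :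
    ys = K.flatMap (fun k => ys.filter (fun p => p.1 == k)) := by
  induction K generalizing ys with
  | nil =>
    cases ys with
    | nil => simp
    | cons p t => exact absurd (hcov p (by simp)) (by simp)
  | cons k K' ihK =>
    induction ys with
    | nil => simp
    | cons p t iht =>
      have hpt : ∀ q ∈ t, p.1 ≤ q.1 := fun q hq => (List.pairwise_cons.mp hys).1 q hq
      have ht : t.Pairwise (fun a b => a.1 ≤ b.1) := (List.pairwise_cons.mp hys).2
      by_cases hpk : p.1 = k
      · -- head belongs to the first run
        have hcovt : ∀ q ∈ t, q.1 ∈ k :: K' := fun q hq => hcov q (by simp [hq])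
        have ht' := iht ht hcovt
        rw [List.flatMap_cons] at ht' ⊢
        rw [List.filter_cons_of_pos (by simp [hpk])]
        have hfl : K'.flatMap (fun k' => List.filter (fun q => q.1 == k') (p :: t))
            = K'.flatMap (fun k' => List.filter (fun q => q.1 == k') t) := by
          apply List.flatMap_congr
          intro k' hk'
          have hlt : k < k' := (List.pairwise_cons.mp hK).1 k' hk'
          have hne : (p.1 == k') = false := by
            simp only [beq_eq_false_iff_ne, hpk]; exact ne_of_lt hlt
          simp [hne]
        rw [hfl, List.cons_append]
        exact congrArg (p :: ·) ht'
      · -- head's key is in K', and the k-run is empty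
        have hmem : p.1 ∈ K' := by
          have := hcov p (by simp); simpa [hpk] using this
        have hkp : k < p.1 := (List.pairwise_cons.mp hK).1 _ hmem
        have hcov' : ∀ q ∈ p :: t, q.1 ∈ K' := by
          intro q hq
          rcases List.mem_cons.mp hq with h | h
          · exact h ▸ hmem
          · have h1 := hcov q hq
            rcases List.mem_cons.mp h1 with h2 | h2
            · exfalso; have := hpt q h; rw [h2] at this; exact absurd (lt_of_lt_of_le hkp this) (lt_irrefl _)
            · exact h2
        have hkrun : (p :: t).filter (fun q => q.1 == k) = [] := by
          rw [List.filter_eq_nil_iff]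
          intro q hq
          have := hcov' q hq
          simp only [beq_iff_eq]
          intro h
          rw [h] at this
          exact absurd ((List.pairwise_cons.mp hK).1 _ this) (lt_irrefl _)
        rw [List.flatMap_cons, hkrun, List.nil_append]
        exact ihK (p :: t) hys hK.of_cons hcov'

lemma pv_groups_eq (arr : List String) :
    (PySem.List.enumerate (arr.map pvNorm) 0).foldl
        (fun d p => d.modify p.2 [] (fun l => l ++ [p.1])) PySem.Dict.empty
      = (pvPairs arr).foldl
        (fun d (q : List Char × Int) => d.modify q.1 [] (fun l => l ++ [q.2])) PySem.Dict.empty := by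
  unfold pvPairs
  rw [pv_enumerate_map, List.foldl_map, List.foldl_map]

lemma pv_solveA_closed (arr : List String) :
    solve arr = PySem.List.sorted
      (((PySem.Set.ofList ((pvPairs arr).map (·.1)) : List (List Char)).filter
          (fun k => decide (2 ≤ ((pvPairs arr).filter (fun p => p.1 == k)).length))).map
        (fun k => (((pvPairs arr).filter (fun p => p.1 == k)).map (·.2)).sum))
      (fun x => x) false := by
  simp only [solve]
  rw [pv_groups_eq]
  set d := (pvPairs arr).foldl
      (fun d (q : List Char × Int) => d.modify q.1 [] (fun l => l ++ [q.2])) PySem.Dict.empty with hd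
  have hkeys : d.keys = PySem.Set.ofList ((pvPairs arr).map (·.1)) := by
    rw [hd, PySem.Dict.keys_foldl_modify_key (pvPairs arr) (·.1) [] (fun _ q => (fun l => l ++ [q.2]))]
    rfl
  have hnd : d.keys.Nodup := by
    rw [hkeys]; exact PySem.Set.nodup_ofList _
  have hget : ∀ k, d.getD k [] = ((pvPairs arr).filter (fun p => p.1 == k)).map (·.2) := by
    intro k
    rw [hd, PySem.Dict.getD_foldl_modify_append]
    rfl
  have hvals : d.values = d.keys.map (fun k => ((pvPairs arr).filter (fun p => p.1 == k)).map (·.2)) := by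
    rw [PySem.Dict.values_eq_map_keys d hnd []]
    exact List.map_congr_left (fun k _ => hget k)
  rw [hvals, hkeys]
  rw [show (fun (r : List Int) (idxs : List Int) => if 2 ≤ idxs.length then r ++ [idxs.sum] else r)
      = (fun r idxs => if (fun v : List Int => decide (2 ≤ v.length)) idxs = true then r ++ [List.sum idxs] else r) from by
    funext r v; by_cases h : 2 ≤ v.length <;> simp [h]]
  rw [PySem.List.foldl_append_if]
  rw [List.filter_map, List.map_map]
  congr 1
  have hp : ((fun v : List Int => decide (2 ≤ v.length)) ∘ fun k => List.map (fun (x : List Char × Int) => x.2) (List.filter (fun p => p.1 == k) (pvPairs arr)))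
      = fun k => decide (2 ≤ (List.filter (fun p => p.1 == k) (pvPairs arr)).length) := by
    funext k; simp [Function.comp]
  rw [hp]
  apply List.map_congr_left
  intro k _
  simp [Function.comp]

lemma pv_solveB_closed (arr : List String) :
    solve_alt arr = PySem.List.sorted
      (((PySem.List.sorted (PySem.Set.ofList ((pvPairs arr).map (·.1)) : List (List Char)) (fun x => x) false).filter
          (fun k => decide (2 ≤ ((pvPairs arr).filter (fun p => p.1 == k)).length))).map
        (fun k => (((pvPairs arr).filter (fun p => p.1 == k)).map (·.2)).sum))
      (fun x => x) false := by
  simp only [solve_alt]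
  rw [show (PySem.List.enumerate arr 0).map (fun p => (pvNorm p.2, p.1)) = pvPairs arr from rfl]
  set ys := PySem.List.sorted (pvPairs arr) (fun t => t.1) false with hys
  set K := PySem.List.sorted (PySem.Set.ofList ((pvPairs arr).map (·.1)) : List (List Char)) (fun x => x) false with hK
  have hperm : ys.Perm (pvPairs arr) := PySem.List.sorted_perm _ _ _
  have hKperm : K.Perm (PySem.Set.ofList ((pvPairs arr).map (·.1))) := PySem.List.sorted_perm _ _ _
  have hdecomp : ys = K.flatMap (fun k => ys.filter (fun p => p.1 == k)) := by
    apply pv_sorted_flatMap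
    · rw [hys, pv_sorted_inst]; exact PySem.List.sorted_pairwise (pvPairs arr) (fun t => t.1)
    · rw [hK, pv_sorted_inst]; exact PySem.List.sorted_ofList_pairwise_lt ((pvPairs arr).map (·.1))
    · intro p hp
      rw [PySem.List.mem_sorted]
      rw [PySem.Set.mem_ofList]
      exact List.mem_map_of_mem (hperm.mem_iff.mp hp)
  have hKmem : ∀ k ∈ K, ∃ p ∈ pvPairs arr, p.1 = k := by
    intro k hk
    rw [PySem.List.mem_sorted, PySem.Set.mem_ofList] at hk
    obtain ⟨p, hp, he⟩ := List.mem_map.mp hk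
    exact ⟨p, hp, he⟩
  have hscan : pvScanRuns ys none 0 0 []
      = (K.filter (fun k => decide (2 ≤ (ys.filter (fun p => p.1 == k)).length))).map
          (fun k => ((ys.filter (fun p => p.1 == k)).map (·.2)).sum) := by
    conv_lhs => rw [hdecomp]
    rw [pv_scan_runs]
    · norm_num
    · intro k hk
      obtain ⟨p, hp, he⟩ := hKmem k hk
      have : p ∈ ys.filter (fun p => p.1 == k) := by
        rw [List.mem_filter]
        exact ⟨hperm.mem_iff.mpr hp, by simp [he]⟩
      exact List.ne_nil_of_mem this
    · intro k _ p hp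
      simpa using (List.mem_filter.mp hp).2
    · exact hKperm.symm.nodup (PySem.Set.nodup_ofList ((pvPairs arr).map (·.1)))
    · intro k _; simp
  rw [hscan]
  congr 1
  have hfil : ∀ k, ((ys.filter (fun p => p.1 == k)).Perm ((pvPairs arr).filter (fun p => p.1 == k))) :=
    fun k => hperm.filter _
  have h1 : ∀ k, (ys.filter (fun p => p.1 == k)).length = ((pvPairs arr).filter (fun p => p.1 == k)).length :=
    fun k => (hfil k).length_eq
  have h2 : ∀ k, ((ys.filter (fun p => p.1 == k)).map (·.2)).sum
      = (((pvPairs arr).filter (fun p => p.1 == k)).map (·.2)).sum :=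
    fun k => ((hfil k).map _).sum_eq
  rw [List.filter_congr (fun k _ => by rw [h1 k])]
  exact List.map_congr_left (fun k _ => h2 k)

theorem pv_main (arr : List String) : solve arr = solve_alt arr := by
  rw [pv_solveA_closed, pv_solveB_closed]
  rw [pv_sorted_inst_int, pv_sorted_inst_int]
  apply PySem.List.sorted_eq_sorted_of_perm _ _ (fun x => x) (fun a b h => h)
  exact (((PySem.List.sorted_perm _ _ _).filter _).map _).symm

-- ===== VERDICT (by name: the statement is the Claim_ definition above) =====
theorem solve_spec : Claim_equal_solve := by
  intro arr _
  unfold Spec_solve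
  exact pv_main arr
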